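-- pv_equiv track=rewrite | github.com/yancborges/code_nebula | machine learning/testing/evaluating.py | binary_string_gen
-- ===== SOURCE A (Python) =====
-- def binary_string_gen(non_binary):
-- 		binary_array = []
-- 		for i in range(1,MAX_GENRES):
-- 			if(i in non_binary):
-- 				binary_array.append(1)
-- 			else:
-- 				binary_array.append(0)
-- 		return binary_array
--
-- MAX_GENRES = 43
-- ===== SOURCE B (Python) =====
-- def binary_string_gen(non_binary):
--     binary_array = [0] * (MAX_GENRES - 1)
--     for v in non_binary:
--         if 1 <= v < MAX_GENRES:
--             binary_array[v - 1] = 1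
--     return binary_array
--
-- MAX_GENRES = 43
-- ===== Notes on version B (the rewrite author's own statement) =====
-- stated objective: faster
-- what changed: Instead of scanning range(1,43) and doing an O(n) membership test per index, B preallocates a zeroed 42-slot array and makes one pass over non_binary, scattering 1 at index v-1 for each in-range value.
import Mathlib
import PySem

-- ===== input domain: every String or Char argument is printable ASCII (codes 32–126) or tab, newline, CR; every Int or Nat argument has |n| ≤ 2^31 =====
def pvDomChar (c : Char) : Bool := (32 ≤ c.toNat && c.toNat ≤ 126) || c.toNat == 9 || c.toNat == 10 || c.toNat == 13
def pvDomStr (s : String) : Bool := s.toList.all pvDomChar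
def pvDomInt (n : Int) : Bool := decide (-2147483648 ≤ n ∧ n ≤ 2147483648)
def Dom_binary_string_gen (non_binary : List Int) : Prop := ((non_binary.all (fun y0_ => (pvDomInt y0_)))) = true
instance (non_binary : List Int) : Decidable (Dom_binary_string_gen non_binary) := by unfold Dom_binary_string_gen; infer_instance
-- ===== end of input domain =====

-- B replaces A's scan over range(1,43) with O(n) membership tests by a single
-- scatter pass over non_binary into a pre-zeroed 42-slot array (objective: faster).


-- ===== PORT A =====
-- loop over range(1, MAX_GENRES), appending 1 on membership, 0 otherwise
def binary_string_gen (non_binary : List Int) : List Int :=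
  (PySem.List.pyRange 1 43 1).foldl
    (fun acc i => acc ++ [if i ∈ non_binary then (1 : Int) else 0]) []

-- ===== PORT B =====
-- one step of B's scatter loop: set slot v-1 to 1 when 1 <= v < 43
def bsgStep (acc : List Int) (v : Int) : List Int :=
  if 1 ≤ v ∧ v < 43 then acc.set (v - 1).toNat 1 else acc

def binary_string_gen_alt (non_binary : List Int) : List Int :=
  non_binary.foldl bsgStep (List.replicate 42 0)

-- ===== PRECONDITION & SPEC =====
def Spec_binary_string_gen (non_binary : List Int) (out : List Int) : Prop := out = binary_string_gen_alt non_binary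
instance (non_binary : List Int) (out : List Int) : Decidable (Spec_binary_string_gen non_binary out) := by unfold Spec_binary_string_gen; infer_instance

-- ===== CLAIM (what is proved, stated in full; the proofs are below) =====
def Claim_equal_binary_string_gen : Prop := ∀ (non_binary : List Int), Dom_binary_string_gen non_binary → Spec_binary_string_gen non_binary (binary_string_gen non_binary)

-- ===== LEMMAS AND PROOFS =====

-- A's append-loop is a map
lemma bsg_foldl_app (nb : List Int) (l acc : List Int) :
    l.foldl (fun a i => a ++ [if i ∈ nb then (1 : Int) else 0]) acc
      = acc ++ l.map (fun i => if i ∈ nb then (1 : Int) else 0) := by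
  induction l generalizing acc with
  | nil => simp
  | cons x xs ih => simp [ih]

lemma bsg_pyRange : PySem.List.pyRange 1 43 1 = (List.range 42).map (fun j => Int.ofNat j + 1) := by
  decide

lemma bsgStep_length (acc : List Int) (v : Int) : (bsgStep acc v).length = acc.length := by
  unfold bsgStep; split <;> simp

lemma bsg_fold_length (l acc : List Int) : (l.foldl bsgStep acc).length = acc.length := by
  induction l generalizing acc with
  | nil => rfl
  | cons x xs ih => simp [List.foldl, ih, bsgStep_length]

lemma bsgStep_get (acc : List Int) (v : Int) (j : Nat) (hj : j < acc.length)
    (h42 : acc.length = 42) :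
    (bsgStep acc v)[j]'(by rw [bsgStep_length]; exact hj)
      = if (j : Int) + 1 = v then 1 else acc[j]'hj := by
  unfold bsgStep
  split
  · rename_i hv
    by_cases he : (j : Int) + 1 = v
    · have hidx : v.toNat - 1 = j := by omega
      simp [List.getElem_set, hidx, he]
    · have hne : v.toNat - 1 ≠ j := by omega
      simp [List.getElem_set, hne, he]
  · rename_i hv
    have : (j : Int) + 1 ≠ v := by omega
    simp [this]

lemma bsg_fold_get (l : List Int) (acc : List Int) (j : Nat) (hj : j < acc.length)
    (h42 : acc.length = 42) :
    (l.foldl bsgStep acc)[j]'(by rw [bsg_fold_length]; exact hj)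
      = if ((j : Int) + 1) ∈ l then 1 else acc[j]'hj := by
  induction l generalizing acc with
  | nil => simp
  | cons x xs ih =>
    have hj' : j < (bsgStep acc x).length := by rw [bsgStep_length]; exact hj
    have h42' : (bsgStep acc x).length = 42 := by rw [bsgStep_length]; exact h42
    simp only [List.foldl_cons]
    rw [ih (bsgStep acc x) hj' h42', bsgStep_get acc x j hj h42]
    by_cases hm : ((j : Int) + 1) ∈ xs
    · simp [hm]
    · by_cases he : (j : Int) + 1 = x <;> simp [hm, he]

-- ===== VERDICT (by name: the statement is the Claim_ definition above) =====
theorem binary_string_gen_spec : Claim_equal_binary_string_gen := by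
  intro nb _
  unfold Spec_binary_string_gen binary_string_gen binary_string_gen_alt
  rw [bsg_foldl_app, bsg_pyRange]
  apply List.ext_getElem
  · simp [bsg_fold_length]
  · intro j h1 h2
    have hj : j < (List.replicate 42 (0 : Int)).length := by
      simpa using (by simpa [bsg_fold_length] using h2)
    rw [bsg_fold_get nb (List.replicate 42 0) j hj (by simp)]
    simp only [List.nil_append, List.getElem_map, List.getElem_range, List.getElem_replicate]
    rfl
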